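-- pv_equiv track=rewrite | github.com/Lucasx10/CompilerExpressions | CompilerExpressions.py | AutomatoFloat
-- ===== SOURCE A (Python) =====
-- def AutomatoFloat(string):
--     M = [[1, -1, -1, -1, -1], [1, -1, -1, -1, -1], [2, 2, 2, 4, 4], [-1, -1, 3, -1, -1]]
--     e = 0
--     for char in string:
--         if char.isdigit():
--             c = 2
--         elif char == "+":
--             c = 0
--         elif char == "-":
--             c = 1
--         elif char == ".":
--             c = 3
--         else:
--             return False
--         e = M[c][e]
--         if e == -1:
--             return False
--     if e == 4:
--         return True
--     else:
--         return False
-- ===== SOURCE B (Python) =====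
-- def AutomatoFloat(string):
--     if string[:1] in ('+', '-'):
--         string = string[1:]
--     left, dot, right = string.partition('.')
--     return dot == '.' and '.' not in right and left.isdigit() and right.isdigit()
-- ===== Notes on version B (the rewrite author's own statement) =====
-- stated objective: simpler
-- what changed: Replaced the hand-coded DFA transition table and state loop with a direct decomposition: strip an optional sign, partition on the first '.', and check both sides with str.isdigit.
import Mathlib
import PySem

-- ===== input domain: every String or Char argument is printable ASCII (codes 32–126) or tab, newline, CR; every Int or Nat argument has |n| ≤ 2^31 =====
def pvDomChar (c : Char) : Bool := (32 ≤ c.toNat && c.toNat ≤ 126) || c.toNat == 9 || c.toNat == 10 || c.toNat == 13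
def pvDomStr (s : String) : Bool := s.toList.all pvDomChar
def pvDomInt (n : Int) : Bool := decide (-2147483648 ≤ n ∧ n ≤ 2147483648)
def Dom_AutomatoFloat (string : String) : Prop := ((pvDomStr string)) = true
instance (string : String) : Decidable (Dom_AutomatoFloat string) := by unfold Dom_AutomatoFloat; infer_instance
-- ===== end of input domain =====

-- B replaces A's DFA transition table and state loop with a direct decomposition:
-- strip an optional sign, partition on the first '.', check both sides are nonempty digit runs.

-- ===== PORT A =====
def pvFloatM : List (List Int) :=
  [[1, -1, -1, -1, -1], [1, -1, -1, -1, -1], [2, 2, 2, 4, 4], [-1, -1, 3, -1, -1]]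

def pvFloatLoop (cs : List Char) (e : Int) : Bool :=
  match cs with
  | [] => e == 4
  | ch :: rest =>
    let c? : Option Int :=
      if PySem.Chars.isdigit ch then some 2
      else if ch == '+' then some 0
      else if ch == '-' then some 1
      else if ch == '.' then some 3
      else none
    match c? with
    | none => false                                        -- "return False" on any other character
    | some c =>
      -- e = M[c][e]: here c ∈ {0,1,2,3} and e ∈ {0,1,2,3,4} always, so the indexing never
      -- falls outside the table and the defaults are never used (exact).
      let e' := PySem.List.pyGetD (PySem.List.pyGetD pvFloatM c []) e (-1)
      if e' == -1 then false else pvFloatLoop rest e'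

def AutomatoFloat (string : String) : Bool := pvFloatLoop string.toList 0

-- ===== PORT B =====
def AutomatoFloat_alt (string : String) : Bool :=
  let cs0 := string.toList
  let head := PySem.List.slice cs0 none (some 1)           -- string[:1]
  let cs := if head == ['+'] || head == ['-']
            then PySem.List.slice cs0 (some 1) none        -- string[1:]
            else cs0
  -- string.partition('.') ported by hand (split at the FIRST '.'; exact):
  let left := cs.takeWhile (· != '.')
  match cs.dropWhile (· != '.') with
  | [] => false                                            -- no '.' found: dot ≠ '.'
  | _ :: right =>
    !(right.contains '.') && PySem.Chars.strIsdigit left && PySem.Chars.strIsdigit right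

-- ===== PRECONDITION & SPEC =====
def Spec_AutomatoFloat (string : String) (out : Bool) : Prop := out = AutomatoFloat_alt string
instance (string : String) (out : Bool) : Decidable (Spec_AutomatoFloat string out) := by unfold Spec_AutomatoFloat; infer_instance

-- ===== CLAIM (what is proved, stated in full; the proofs are below) =====
def Claim_equal_AutomatoFloat : Prop := ∀ (string : String), Dom_AutomatoFloat string → Spec_AutomatoFloat string (AutomatoFloat string)

-- ===== LEMMAS AND PROOFS =====

-- B's check after the optional sign has been removed
def pvBcore (cs : List Char) : Bool :=
  let left := cs.takeWhile (· != '.')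
  match cs.dropWhile (· != '.') with
  | [] => false
  | _ :: right =>
    !(right.contains '.') && PySem.Chars.strIsdigit left && PySem.Chars.strIsdigit right


lemma contains_dot_not_digits (r : List Char) (h : r.contains '.' = true) :
    r.all PySem.Chars.isdigit = false := by
  refine List.all_eq_false.2 ⟨'.', by simpa using h, by decide⟩

lemma loop4 (cs : List Char) : pvFloatLoop cs 4 = cs.all PySem.Chars.isdigit := by
  induction cs with
  | nil => decide
  | cons ch rest ih =>
    by_cases hd : PySem.Chars.isdigit ch
    · simp [pvFloatLoop, hd, pvFloatM, PySem.List.pyGetD, PySem.List.pyGet?, PySem.List.pyIdx?, ih]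
    · by_cases hp : ch = '+' <;> by_cases hm : ch = '-' <;> by_cases hq : ch = '.' <;>
        simp_all [pvFloatLoop, pvFloatM, PySem.List.pyGetD, PySem.List.pyGet?, PySem.List.pyIdx?]
lemma loop3 (cs : List Char) : pvFloatLoop cs 3 = PySem.Chars.strIsdigit cs := by
  cases cs with
  | nil => decide
  | cons ch rest =>
    by_cases hd : PySem.Chars.isdigit ch
    · simp [pvFloatLoop, hd, pvFloatM, PySem.List.pyGetD, PySem.List.pyGet?, PySem.List.pyIdx?,
        loop4, PySem.Chars.strIsdigit]
    · by_cases hp : ch = '+' <;> by_cases hm : ch = '-' <;> by_cases hq : ch = '.' <;>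
        simp_all [pvFloatLoop, pvFloatM, PySem.List.pyGetD, PySem.List.pyGet?, PySem.List.pyIdx?,
          PySem.Chars.strIsdigit]

lemma loop2 (cs : List Char) :
    pvFloatLoop cs 2 =
      ((cs.takeWhile (· != '.')).all PySem.Chars.isdigit &&
        match cs.dropWhile (· != '.') with
        | [] => false
        | _ :: right => !(right.contains '.') && PySem.Chars.strIsdigit right) := by
  induction cs with
  | nil => decide
  | cons ch rest ih =>
    by_cases hq : ch = '.'
    · subst hq
      have hdot : PySem.Chars.isdigit '.' = false := by decide
      have hne : (('.' : Char) != '.') = false := by decide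
      simp [pvFloatLoop, pvFloatM, PySem.List.pyGetD, PySem.List.pyGet?, PySem.List.pyIdx?,
        loop3, List.takeWhile, List.dropWhile, hdot]
      by_cases hc : '.' ∈ rest
      · have := contains_dot_not_digits rest (by simpa using hc)
        simp [hc, PySem.Chars.strIsdigit, this]
      · simp [hc]
    · have hne : (ch != '.') = true := by simpa using hq
      by_cases hd : PySem.Chars.isdigit ch
      · simp [pvFloatLoop, hd, pvFloatM, PySem.List.pyGetD, PySem.List.pyGet?, PySem.List.pyIdx?,
          ih, List.takeWhile, List.dropWhile, hne]
      · have h1 : pvFloatLoop (ch :: rest) 2 = false := by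
          by_cases hp : ch = '+' <;> by_cases hm : ch = '-' <;>
            simp_all [pvFloatLoop, pvFloatM, PySem.List.pyGetD, PySem.List.pyGet?, PySem.List.pyIdx?]
        rw [h1]
        simp [List.takeWhile, hne, hd]
lemma loop1 (cs : List Char) : pvFloatLoop cs 1 = pvBcore cs := by
  cases cs with
  | nil => decide
  | cons ch rest =>
    by_cases hq : ch = '.'
    · subst hq
      have hdot : PySem.Chars.isdigit '.' = false := by decide
      simp [pvFloatLoop, pvFloatM, PySem.List.pyGetD, PySem.List.pyGet?, PySem.List.pyIdx?,
        pvBcore, List.takeWhile, List.dropWhile, PySem.Chars.strIsdigit, hdot]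
    · have hne : (ch != '.') = true := by simpa using hq
      by_cases hd : PySem.Chars.isdigit ch
      · cases hdw : List.dropWhile (fun x => x != '.') rest <;>
          simp [pvFloatLoop, hd, pvFloatM, PySem.List.pyGetD, PySem.List.pyGet?, PySem.List.pyIdx?,
            loop2, pvBcore, List.takeWhile, List.dropWhile, hne, PySem.Chars.strIsdigit, hdw,
            Bool.and_assoc, Bool.and_comm]
      · have h1 : pvFloatLoop (ch :: rest) 1 = false := by
          by_cases hp : ch = '+' <;> by_cases hm : ch = '-' <;>
            simp_all [pvFloatLoop, pvFloatM, PySem.List.pyGetD, PySem.List.pyGet?, PySem.List.pyIdx?]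
        rw [h1]
        cases hdw : List.dropWhile (fun x => x != '.') rest <;>
          simp [pvBcore, List.takeWhile, List.dropWhile, hne, PySem.Chars.strIsdigit, hd, hdw]

lemma loop0 (cs : List Char) (h : ∀ c r, cs = c :: r → c ≠ '+' ∧ c ≠ '-') :
    pvFloatLoop cs 0 = pvBcore cs := by
  cases cs with
  | nil => decide
  | cons ch rest =>
    obtain ⟨hp, hm⟩ := h ch rest rfl
    rw [← loop1]
    by_cases hq : ch = '.'
    · subst hq
      have hdot : PySem.Chars.isdigit '.' = false := by decide
      simp [pvFloatLoop, pvFloatM, PySem.List.pyGetD, PySem.List.pyGet?, PySem.List.pyIdx?, hdot]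
    · by_cases hd : PySem.Chars.isdigit ch <;>
        simp_all [pvFloatLoop, pvFloatM, PySem.List.pyGetD, PySem.List.pyGet?, PySem.List.pyIdx?]

lemma alt_eq_bcore (s : String) :
    AutomatoFloat_alt s =
      (if (PySem.List.slice s.toList none (some 1) == ['+']
           || PySem.List.slice s.toList none (some 1) == ['-'])
       then pvBcore s.toList.tail else pvBcore s.toList) := by
  unfold AutomatoFloat_alt pvBcore
  simp only [PySem.List.slice_from_one]
  by_cases h : (PySem.List.slice s.toList none (some 1) == ['+']
      || PySem.List.slice s.toList none (some 1) == ['-']) = true <;>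
    simp [h]


lemma a_eq_alt (s : String) : AutomatoFloat s = AutomatoFloat_alt s := by
  rw [alt_eq_bcore]
  unfold AutomatoFloat
  have h1 : PySem.List.slice s.toList none (some 1) = s.toList.take 1 := by
    simp [pysem]
  cases hcs : s.toList with
  | nil => simp [pvFloatLoop, pvBcore]
  | cons c r =>
    rw [hcs] at h1
    simp only [h1, List.take, List.tail]
    by_cases hp : c = '+'
    · subst hp
      have : pvFloatLoop ('+' :: r) 0 = pvFloatLoop r 1 := by
        have hpd : PySem.Chars.isdigit '+' = false := by decide
        simp [pvFloatLoop, pvFloatM, PySem.List.pyGetD, PySem.List.pyGet?, PySem.List.pyIdx?, hpd]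
      simp [this, loop1]
    · by_cases hm : c = '-'
      · subst hm
        have : pvFloatLoop ('-' :: r) 0 = pvFloatLoop r 1 := by
          have hmd : PySem.Chars.isdigit '-' = false := by decide
          simp [pvFloatLoop, pvFloatM, PySem.List.pyGetD, PySem.List.pyGet?, PySem.List.pyIdx?, hmd]
        simp [this, loop1]
      · have hne : ([c] == ['+'] || [c] == ['-']) = false := by
          simp [hp, hm]
        simp only [hne, Bool.false_eq_true, if_false]
        exact loop0 (c :: r) (by intro a b hab; cases hab; exact ⟨hp, hm⟩)

-- ===== VERDICT (by name: the statement is the Claim_ definition above) =====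
theorem AutomatoFloat_spec : Claim_equal_AutomatoFloat := by
  intro s _
  exact a_eq_alt s
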